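-- pv_equiv track=rewrite | github.com/ryofujimura/ClassScheduler | scripts/calculator.py | find_class_combinations
-- ===== SOURCE A (Python) =====
-- def find_class_combinations(class_schedule_info, personal_schedule):
--     def backtrack(index, current_combination):
--         if index == len(class_schedule_info):
--             combinations.append(current_combination.copy())
--             return
--         class_name, class_sections = list(class_schedule_info.items())[index]
--         for section in class_sections:
--             if all(
--                 not overlap(sect, section) for sect in current_combination
--             ) and not overlap_personal_schedule(section):
--                 current_combination.append(section)
--                 backtrack(index + 1, current_combination)
--                 current_combination.pop()
--
--     def overlap(section1, section2):
--         time1, day1 = section1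
--         time2, day2 = section2
--         return day1 == day2 and (time1[0] <= time2[1] and time2[0] <= time1[1])
--
--     def overlap_personal_schedule(section):
--         time, day = section
--         for personal_section in personal_schedule:
--             for d in day:
--                 if d in personal_section[1] and (
--                     time[0] <= personal_section[0][1]
--                     and personal_section[0][0] <= time[1]
--                 ):
--                     return True
--         return False
--
--     combinations = []
--     backtrack(0, [])
--     return combinations
-- ===== SOURCE B (Python) =====
-- def find_class_combinations(class_schedule_info, personal_schedule):
--     # Iterative frontier expansion over classes instead of recursive backtracking.
--     def overlap(section1, section2):
--         time1, day1 = section1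
--         time2, day2 = section2
--         return day1 == day2 and (time1[0] <= time2[1] and time2[0] <= time1[1])
--
--     def overlap_personal_schedule(section):
--         time, day = section
--         for personal_section in personal_schedule:
--             for d in day:
--                 if d in personal_section[1] and (
--                     time[0] <= personal_section[0][1]
--                     and personal_section[0][0] <= time[1]
--                 ):
--                     return True
--         return False
--
--     partials = [[]]
--     for class_sections in class_schedule_info.values():
--         new_partials = []
--         for partial in partials:
--             for section in class_sections:
--                 if not overlap_personal_schedule(section) and all(
--                     not overlap(sect, section) for sect in partial
--                 ):
--                     new_partials.append(partial + [section])
--         partials = new_partials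
--     return partials
-- ===== Notes on version B (the rewrite author's own statement) =====
-- stated objective: alternative
-- what changed: Replaces the recursive DFS backtracking (append/recurse/pop on a shared mutable list) with an iterative breadth-wise frontier expansion: a list of partial combinations is extended class by class, keeping the partials-outer / sections-inner order so the output list is identical.
import Mathlib
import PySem

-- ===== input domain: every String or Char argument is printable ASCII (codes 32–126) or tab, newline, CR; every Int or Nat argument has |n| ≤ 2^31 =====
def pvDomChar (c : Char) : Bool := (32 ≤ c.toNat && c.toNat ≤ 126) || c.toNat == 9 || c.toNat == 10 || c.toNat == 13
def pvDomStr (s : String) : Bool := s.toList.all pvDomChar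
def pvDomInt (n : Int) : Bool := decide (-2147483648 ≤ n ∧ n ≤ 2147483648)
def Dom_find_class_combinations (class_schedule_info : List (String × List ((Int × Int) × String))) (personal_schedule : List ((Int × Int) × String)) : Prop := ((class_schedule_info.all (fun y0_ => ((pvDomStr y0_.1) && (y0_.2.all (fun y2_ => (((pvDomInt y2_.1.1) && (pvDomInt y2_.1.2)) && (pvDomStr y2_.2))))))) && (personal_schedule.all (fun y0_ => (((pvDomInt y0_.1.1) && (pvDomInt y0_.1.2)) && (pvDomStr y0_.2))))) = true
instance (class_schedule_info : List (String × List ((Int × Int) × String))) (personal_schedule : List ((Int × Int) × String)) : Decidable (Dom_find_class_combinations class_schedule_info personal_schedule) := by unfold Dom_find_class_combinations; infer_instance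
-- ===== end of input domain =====

-- B replaces A's recursive DFS backtracking by an iterative frontier expansion over classes
-- (same output list, same order); objective: alternative decomposition, not speed.

-- ===== PORT A =====
-- helper `overlap` of Source A
def pyOverlap (s1 s2 : (Int × Int) × String) : Bool :=
  (s1.2 == s2.2) &&
    (decide (s1.1.1 ≤ s2.1.2) && decide (s2.1.1 ≤ s1.1.2))

-- helper `overlap_personal_schedule` of Source A (returns True at the first hit = List.any)
def pyOverlapPersonal (personal_schedule : List ((Int × Int) × String))
    (sec : (Int × Int) × String) : Bool :=
  personal_schedule.any (fun ps =>
    sec.2.toList.any (fun d =>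
      ps.2.toList.contains d &&
        (decide (sec.1.1 ≤ ps.1.2) && decide (ps.1.1 ≤ sec.1.2))))

-- `backtrack(index, current_combination)`: recursion on the remaining classes; the
-- append/recurse/pop on the mutable list is the functional call with cur ++ [s];
-- the leaves are collected left to right (acc ++ …).
def pyBacktrack (personal_schedule : List ((Int × Int) × String)) :
    List (String × List ((Int × Int) × String)) → List ((Int × Int) × String) →
      List (List ((Int × Int) × String))
  | [], cur => [cur]
  | (_, secs) :: rest, cur =>
      secs.foldl (fun acc s =>
        if (cur.all fun sect => !pyOverlap sect s) && !pyOverlapPersonal personal_schedule s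
        then acc ++ pyBacktrack personal_schedule rest (cur ++ [s])
        else acc) []

def find_class_combinations (class_schedule_info : List (String × List ((Int × Int) × String))) (personal_schedule : List ((Int × Int) × String)) : List (List ((Int × Int) × String)) :=
  pyBacktrack personal_schedule class_schedule_info []

-- ===== PORT B =====
-- one step of Source B's loop over classes: expand every partial (outer) by every
-- admissible section of this class (inner), in order
def altStep (personal_schedule : List ((Int × Int) × String))
    (partials : List (List ((Int × Int) × String)))
    (class_sections : List ((Int × Int) × String)) : List (List ((Int × Int) × String)) :=
  partials.foldl (fun acc p =>
    class_sections.foldl (fun acc2 s =>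
      if !pyOverlapPersonal personal_schedule s && (p.all fun sect => !pyOverlap sect s)
      then acc2 ++ [p ++ [s]]
      else acc2) acc) []

def find_class_combinations_alt (class_schedule_info : List (String × List ((Int × Int) × String))) (personal_schedule : List ((Int × Int) × String)) : List (List ((Int × Int) × String)) :=
  class_schedule_info.foldl (fun partials c => altStep personal_schedule partials c.2) [[]]

-- ===== PRECONDITION & SPEC =====
def Spec_find_class_combinations (class_schedule_info : List (String × List ((Int × Int) × String))) (personal_schedule : List ((Int × Int) × String)) (out : List (List ((Int × Int) × String))) : Prop := out = find_class_combinations_alt class_schedule_info personal_schedule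
instance (class_schedule_info : List (String × List ((Int × Int) × String))) (personal_schedule : List ((Int × Int) × String)) (out : List (List ((Int × Int) × String))) : Decidable (Spec_find_class_combinations class_schedule_info personal_schedule out) := by unfold Spec_find_class_combinations; infer_instance

-- ===== CLAIM (what is proved, stated in full; the proofs are below) =====
def Claim_equal_find_class_combinations : Prop := ∀ (class_schedule_info : List (String × List ((Int × Int) × String))) (personal_schedule : List ((Int × Int) × String)), Dom_find_class_combinations class_schedule_info personal_schedule → Spec_find_class_combinations class_schedule_info personal_schedule (find_class_combinations class_schedule_info personal_schedule)

-- ===== LEMMAS AND PROOFS =====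

-- f = g on the members of l gives equal folds
theorem my_foldl_congr {α β : Type} {f g : β → α → β} {l : List α} {init : β}
    (h : ∀ acc x, x ∈ l → f acc x = g acc x) : l.foldl f init = l.foldl g init := by
  induction l generalizing init with
  | nil => rfl
  | cons x t ih =>
    simp only [List.foldl_cons, h init x (by simp)]
    exact ih (fun acc y hy => h acc y (by simp [hy]))

-- a guarded extend-fold is acc ++ filter-then-flatMap
theorem foldl_if_append_flatMap {α β : Type} (c : α → Bool) (g : α → List β)
    (l : List α) (acc : List β) :
    l.foldl (fun a x => if c x then a ++ g x else a) acc = acc ++ (l.filter c).flatMap g := by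
  induction l generalizing acc with
  | nil => simp
  | cons x t ih =>
    by_cases h : c x = true <;> simp [List.foldl_cons, h, ih]

-- one class step of A's recursion in filter/flatMap form
theorem pyBacktrack_cons (personal : List ((Int × Int) × String))
    (name : String) (secs : List ((Int × Int) × String))
    (rest : List (String × List ((Int × Int) × String))) (cur : List ((Int × Int) × String)) :
    pyBacktrack personal ((name, secs) :: rest) cur =
      (secs.filter (fun s =>
        (cur.all fun sect => !pyOverlap sect s) && !pyOverlapPersonal personal s)).flatMap
        (fun s => pyBacktrack personal rest (cur ++ [s])) := by
  simpa [pyBacktrack] using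
    foldl_if_append_flatMap
      (fun s => (cur.all fun sect => !pyOverlap sect s) && !pyOverlapPersonal personal s)
      (fun s => pyBacktrack personal rest (cur ++ [s])) secs []

-- B's step in filter/map form
theorem altStep_eq (personal : List ((Int × Int) × String))
    (P : List (List ((Int × Int) × String))) (secs : List ((Int × Int) × String)) :
    altStep personal P secs =
      P.flatMap (fun p =>
        (secs.filter (fun s =>
          !pyOverlapPersonal personal s && (p.all fun sect => !pyOverlap sect s))).map
          (fun s => p ++ [s])) := by
  have inner : ∀ (p : List ((Int × Int) × String)) (acc : List (List ((Int × Int) × String))),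
      secs.foldl (fun acc2 s =>
        if !pyOverlapPersonal personal s && (p.all fun sect => !pyOverlap sect s)
        then acc2 ++ [p ++ [s]] else acc2) acc =
      acc ++ (secs.filter (fun s =>
        !pyOverlapPersonal personal s && (p.all fun sect => !pyOverlap sect s))).map
        (fun s => p ++ [s]) := by
    intro p acc
    exact PySem.List.foldl_append_if _ _ secs acc
  calc altStep personal P secs
      = P.foldl (fun acc p => acc ++ (secs.filter (fun s =>
          !pyOverlapPersonal personal s && (p.all fun sect => !pyOverlap sect s))).map
          (fun s => p ++ [s])) [] := by
        unfold altStep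
        exact my_foldl_congr (fun acc p _ => inner p acc)
    _ = _ := by
        simpa using PySem.List.foldl_append_eq_flatMap _ P []

-- the frontier expansion starting from P equals backtracking from each partial of P
theorem expand_eq (personal : List ((Int × Int) × String)) :
    ∀ (cl : List (String × List ((Int × Int) × String)))
      (P : List (List ((Int × Int) × String))),
      cl.foldl (fun partials c => altStep personal partials c.2) P =
        P.flatMap (fun cur => pyBacktrack personal cl cur) := by
  intro cl
  induction cl with
  | nil => intro P; simp [pyBacktrack]
  | cons c t ih =>
    intro P
    obtain ⟨name, secs⟩ := c
    calc (((name, secs) :: t).foldl (fun partials c => altStep personal partials c.2) P)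
        = (altStep personal P secs).flatMap (fun cur => pyBacktrack personal t cur) := by
          simp [List.foldl_cons, ih]
      _ = P.flatMap (fun cur => pyBacktrack personal ((name, secs) :: t) cur) := by
          rw [altStep_eq, List.flatMap_assoc]
          refine List.flatMap_congr (fun p _ => ?_)
          rw [pyBacktrack_cons, List.flatMap_map]
          congr 1
          refine List.filter_congr (fun s _ => ?_)
          exact Bool.and_comm _ _

-- ===== VERDICT (by name: the statement is the Claim_ definition above) =====
theorem find_class_combinations_spec : Claim_equal_find_class_combinations := by
  intro csi ps _
  unfold Spec_find_class_combinations find_class_combinations find_class_combinations_alt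
  rw [expand_eq]
  simp
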